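-- pv_equiv track=rewrite | github.com/thegeek-sys/uni | FP/ESAMS-GH/Esami/2018-2019/Esame-2/program.soluzione.py | es2
-- ===== SOURCE A (Python) =====
-- def es2(lista):
--     # inserisci qui il tuo codice
--     lista1=[]
--     for x in lista:
--         s=set(x)
--         s1=sorted(s)
--         a=x.replace(s1[0],'*')
--         a=a.replace(s1[-1],'*')
--         lista1.append(a)
--     return lista1
-- ===== SOURCE B (Python) =====
-- def es2(lista):
--     out = []
--     for x in lista:
--         lo, hi = min(x), max(x)
--         out.append(''.join('*' if c == lo or c == hi else c for c in x))
--     return out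
-- ===== Notes on version B (the rewrite author's own statement) =====
-- stated objective: simpler
-- what changed: B finds the smallest and largest character with min/max instead of building and sorting a set, and produces each result in one conditional character scan instead of two sequential global str.replace passes.
import Mathlib
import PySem

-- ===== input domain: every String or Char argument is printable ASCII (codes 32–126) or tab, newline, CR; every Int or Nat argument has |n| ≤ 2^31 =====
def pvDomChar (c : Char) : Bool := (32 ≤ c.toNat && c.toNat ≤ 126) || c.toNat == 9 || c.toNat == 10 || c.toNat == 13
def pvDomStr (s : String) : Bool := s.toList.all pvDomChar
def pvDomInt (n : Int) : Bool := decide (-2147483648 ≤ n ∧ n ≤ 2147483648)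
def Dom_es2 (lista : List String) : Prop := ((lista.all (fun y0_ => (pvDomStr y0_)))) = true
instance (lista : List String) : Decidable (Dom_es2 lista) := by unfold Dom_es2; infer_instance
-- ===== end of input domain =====

-- B replaces A's sort-a-set extraction and two global str.replace passes by min/max plus one
-- conditional character scan (objective: simpler). Equivalence is about the return value.

-- ===== PORT A =====
-- s = set(x); s1 = sorted(s)
def es2Sorted (x : String) : List Char :=
  PySem.List.sorted (PySem.Set.ofList x.toList) (fun c => c)

-- a = x.replace(s1[0],'*'); a = a.replace(s1[-1],'*')  (s1[0]/s1[-1] raise IndexError on "")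
def es2Line (x : String) : String :=
  match PySem.List.pyGet? (es2Sorted x) 0, PySem.List.pyGet? (es2Sorted x) (-1) with
  | some c0, some cl =>
      PySem.Str.replace (PySem.Str.replace x (String.ofList [c0]) "*") (String.ofList [cl]) "*"
  | _, _ => x   -- unreachable under Pre_es2 (Python raises IndexError here)

def es2 (lista : List String) : List String :=
  lista.foldl (fun lista1 x => lista1 ++ [es2Line x]) []

-- ===== PORT B =====
-- lo, hi = min(x), max(x); ''.join('*' if c == lo or c == hi else c for c in x)
def es2AltLine (x : String) : String :=
  match PySem.List.min? x.toList (fun c => c), PySem.List.max? x.toList (fun c => c) with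
  | some lo, some hi =>
      String.ofList (x.toList.map (fun c => if c == lo || c == hi then '*' else c))
  | _, _ => x   -- unreachable under Pre_es2 (Python raises ValueError here)

def es2_alt (lista : List String) : List String :=
  lista.foldl (fun out x => out ++ [es2AltLine x]) []

-- ===== PRECONDITION & SPEC =====
-- Pre_ excludes lists containing an empty string, on which A raises IndexError
-- (sorted(set(''))[0]) and B raises ValueError (min('')): both crash, nothing to compare.
def Pre_es2 (lista : List String) : Prop := ∀ x ∈ lista, x ≠ ""
instance (lista : List String) : Decidable (Pre_es2 lista) := by unfold Pre_es2; infer_instance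

def pvWitness_es2 : List String := ["hello", "a", "**a"]

def Spec_es2 (lista : List String) (out : List String) : Prop := out = es2_alt lista
instance (lista : List String) (out : List String) : Decidable (Spec_es2 lista out) := by unfold Spec_es2; infer_instance

-- ===== CLAIM (what is proved, stated in full; the proofs are below) =====
def Claim_equal_es2 : Prop := ∀ (lista : List String), Dom_es2 lista → Pre_es2 lista → Spec_es2 lista (es2 lista)

-- ===== LEMMAS AND PROOFS =====

-- Python's x.replace(old, '*') for a one-character old is a character map.
theorem go_single (c0 : Char) : ∀ (l : List Char) (fuel : Nat) (acc : List Char), l.length ≤ fuel →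
    PySem.Chars.replace.go [c0] ['*'] fuel l acc
      = acc.reverse ++ l.map (fun c => if c = c0 then '*' else c) := by
  intro l
  induction l with
  | nil =>
    intro fuel acc _
    cases fuel <;> simp [PySem.Chars.replace.go]
  | cons c t ih =>
    intro fuel acc h
    cases fuel with
    | zero => simp at h
    | succ f =>
      have hf : t.length ≤ f := by simpa using Nat.le_of_succ_le_succ h
      by_cases hc : c0 = c
      · subst hc
        simp only [PySem.Chars.replace.go, List.isPrefixOf, beq_self_eq_true, Bool.true_and,
          if_true, List.length_cons, List.length_nil, List.drop_succ_cons, List.drop_zero,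
          List.reverse_singleton, List.singleton_append]
        rw [ih f ('*' :: acc) hf]
        simp
      · have hpre : ([c0].isPrefixOf (c :: t)) = false := by
          simp [List.isPrefixOf, hc]
        simp only [PySem.Chars.replace.go, hpre, Bool.false_eq_true, if_false]
        rw [ih f (c :: acc) hf]
        simp [Ne.symm hc]

theorem replace_single (cs : List Char) (c0 : Char) :
    PySem.Chars.replace cs [c0] ['*'] = cs.map (fun c => if c = c0 then '*' else c) := by
  simpa [PySem.Chars.replace] using go_single c0 cs cs.length [] (le_refl _)

theorem le_getLast_of_pairwise {α : Type} [LinearOrder α] :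
    ∀ {l : List α}, l.Pairwise (fun a b => a ≤ b) → ∀ {a : α}, a ∈ l → ∀ (h : l ≠ []), a ≤ l.getLast h := by
  intro l
  induction l with
  | nil => intro _ a ha; cases ha
  | cons x t ih =>
    intro hp a ha h
    cases t with
    | nil =>
      simp only [List.mem_singleton] at ha
      simp [ha, List.getLast]
    | cons y u =>
      rcases List.mem_cons.mp ha with rfl | ha'
      · have hx := (List.pairwise_cons.mp hp).1 _ (List.getLast_mem (l := y :: u) (by simp))
        simpa [List.getLast_cons] using hx
      · have := ih (List.pairwise_cons.mp hp).2 ha' (by simp)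
        simpa [List.getLast_cons] using this

theorem pyGet_neg_one {α : Type} (l : List α) (h : l ≠ []) :
    PySem.List.pyGet? l (-1) = some (l.getLast h) := by
  have hn : 1 ≤ l.length := List.length_pos_iff.mpr h
  have h1 : ¬ ((0 : Int) ≤ -1) := by norm_num
  have h2 : -(l.length : Int) ≤ -1 := by
    have : (1 : Int) ≤ (l.length : Int) := by exact_mod_cast hn
    omega
  unfold PySem.List.pyGet? PySem.List.pyIdx?
  rw [if_neg h1, if_pos h2]
  simp only [Int.neg_neg, Int.toNat_one, Option.bind_some]
  rw [← List.getLast?_eq_getElem?, List.getLast?_eq_getLast h]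

theorem foldl_append_map {α β : Type} (f : α → β) (l : List α) (acc : List β) :
    l.foldl (fun a x => a ++ [f x]) acc = acc ++ l.map f := by
  induction l generalizing acc with
  | nil => simp
  | cons x t ih => simp [ih]

theorem line_eq (x : String) (hx : x.toList ≠ []) : es2Line x = es2AltLine x := by
  -- the sorted dedup list is nonempty
  have hs1ne : es2Sorted x ≠ [] := by
    intro hnil
    have hempty : PySem.Set.ofList x.toList = [] :=
      (PySem.List.sorted_eq_nil_iff _ _ _).mp hnil
    obtain ⟨c, t, hct⟩ := List.exists_cons_of_ne_nil hx
    have : c ∈ PySem.Set.ofList x.toList := (PySem.Set.mem_ofList _ _).mpr (by rw [hct]; exact List.mem_cons_self)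
    rw [hempty] at this
    cases this
  obtain ⟨m, t, hs1⟩ := List.exists_cons_of_ne_nil hs1ne
  -- L = s1[-1], the largest character
  set L := (es2Sorted x).getLast hs1ne with hL
  have hmem_s1 : ∀ y ∈ x.toList, y ∈ es2Sorted x := by
    intro y hy
    exact (PySem.List.mem_sorted _ _ _ y).mpr ((PySem.Set.mem_ofList _ _).mpr hy)
  have hmem_cs : ∀ y ∈ es2Sorted x, y ∈ x.toList := by
    intro y hy
    exact (PySem.Set.mem_ofList _ _).mp ((PySem.List.mem_sorted _ _ _ y).mp hy)
  have hm_min : ∀ y ∈ x.toList, m ≤ y := by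
    intro y hy
    exact PySem.List.key_head_sorted_le _ (fun c => c) hs1 y ((PySem.Set.mem_ofList _ _).mpr hy)
  have hL_max : ∀ y ∈ x.toList, y ≤ L := by
    intro y hy
    exact le_getLast_of_pairwise (PySem.List.sorted_pairwise (PySem.Set.ofList x.toList) (fun c => c))
      (hmem_s1 y hy) hs1ne
  have hm_mem : m ∈ x.toList := hmem_cs m (by rw [hs1]; exact List.mem_cons_self)
  have hL_mem : L ∈ x.toList := hmem_cs L (List.getLast_mem hs1ne)
  -- A's two single-character lookups
  have h0 : PySem.List.pyGet? (es2Sorted x) 0 = some m := by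
    rw [hs1]
    simp [PySem.List.pyGet?, PySem.List.pyIdx?]
  have hlast : PySem.List.pyGet? (es2Sorted x) (-1) = some L := pyGet_neg_one _ hs1ne
  -- B's min and max
  obtain ⟨lo, hlo⟩ : ∃ lo, PySem.List.min? x.toList (fun c => c) = some lo := by
    cases hmn : PySem.List.min? x.toList (fun c => c) with
    | none => exact absurd ((PySem.List.min?_eq_none_iff _ _).mp hmn) hx
    | some v => exact ⟨v, rfl⟩
  obtain ⟨hi, hhi⟩ : ∃ hi, PySem.List.max? x.toList (fun c => c) = some hi := by
    cases hmx : PySem.List.max? x.toList (fun c => c) with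
    | none => exact absurd ((PySem.List.max?_eq_none_iff _ _).mp hmx) hx
    | some v => exact ⟨v, rfl⟩
  have hlom : lo = m :=
    le_antisymm (PySem.List.min?_isMin hlo m hm_mem) (hm_min lo (PySem.List.min?_mem hlo))
  have hhiL : hi = L :=
    le_antisymm (hL_max hi (PySem.List.max?_mem hhi)) (PySem.List.max?_isMax hhi L hL_mem)
  have hstar : ("*" : String).toList = ['*'] := by decide
  unfold es2Line es2AltLine
  rw [h0, hlast, hlo, hhi, hlom, hhiL]
  simp only [PySem.Str.replace, String.toList_ofList, hstar]
  congr 1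
  rw [replace_single, replace_single, List.map_map]
  apply List.map_congr_left
  intro c _
  simp only [Function.comp]
  by_cases h1 : c = m
  · subst h1
    simp [ite_self]
  · by_cases h2 : c = L
    · subst h2
      by_cases h3 : L = m
      · exact absurd h3 h1
      · simp [h3]
    · simp [h1, h2]

-- ===== VERDICT (by name: the statement is the Claim_ definition above) =====
theorem es2_spec : Claim_equal_es2 := by
  intro lista _ hpre
  show es2 lista = es2_alt lista
  unfold es2 es2_alt
  rw [foldl_append_map es2Line, foldl_append_map es2AltLine]
  simp only [List.nil_append]
  refine List.map_congr_left (fun x hx => line_eq x (fun h => hpre x hx ?_))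
  exact String.toList_inj.mp (by simp [h])
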